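-- pv_equiv track=rewrite | github.com/ICPC-Caribbean/icpc-carib-2021 | problems/xorsum/solutions/good/ernestico_py-ac.py | get_best_with_1
-- ===== SOURCE A (Python) =====
-- def get_best_with_1(a, b):
--     ret = 0
--     for i in range(30):
--         if (a&(1<<i)) == (b&(1<<i)):
--             ret += 2 * (1<<i)
--         else:
--             ret += 1 * (1<<i)
--     return ret
-- ===== SOURCE B (Python) =====
-- def get_best_with_1(a, b):
--     mask = (1 << 30) - 1
--     return mask + (mask & ~(a ^ b))
-- ===== Notes on version B (the rewrite author's own statement) =====
-- stated objective: simpler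
-- what changed: Replaces A's 30-iteration per-bit accumulation loop by a single closed-form bitwise expression: MASK = (1<<30)-1 and the result is MASK + (MASK & ~(a ^ b)), since every bit position contributes its weight once plus once more where a and b agree.
import Mathlib
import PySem

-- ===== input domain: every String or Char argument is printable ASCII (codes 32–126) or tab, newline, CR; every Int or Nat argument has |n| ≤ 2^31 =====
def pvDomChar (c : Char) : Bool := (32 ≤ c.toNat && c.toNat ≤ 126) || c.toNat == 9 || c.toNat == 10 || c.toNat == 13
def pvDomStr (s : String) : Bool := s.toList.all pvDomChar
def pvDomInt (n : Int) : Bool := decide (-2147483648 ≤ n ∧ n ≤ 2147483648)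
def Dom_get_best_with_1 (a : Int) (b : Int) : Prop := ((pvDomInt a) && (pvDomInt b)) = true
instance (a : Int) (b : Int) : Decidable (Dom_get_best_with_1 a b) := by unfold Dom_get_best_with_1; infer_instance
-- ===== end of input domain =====

-- B replaces A's 30-iteration per-bit loop by one closed-form bitwise expression
-- MASK + (MASK & ~(a ^ b)); equivalence of the return values is proved below.

-- ===== PORT A =====
-- Python's '1 << i' for the loop's nonnegative i (exact there).
def pyShl1 (i : Int) : Int := 1 <<< i.toNat
def get_best_with_1 (a : Int) (b : Int) : Int :=
  (PySem.List.pyRange 0 30 1).foldl (fun ret i =>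
    if PySem.Int.band a (pyShl1 i) = PySem.Int.band b (pyShl1 i) then
      ret + 2 * pyShl1 i
    else
      ret + 1 * pyShl1 i) 0

-- ===== PORT B =====
def get_best_with_1_alt (a : Int) (b : Int) : Int :=
  let mask : Int := ((1 : Int) <<< 30) - 1
  mask + PySem.Int.band mask (Int.not (PySem.Int.bxor a b))

-- ===== PRECONDITION & SPEC =====
def Spec_get_best_with_1 (a : Int) (b : Int) (out : Int) : Prop := out = get_best_with_1_alt a b
instance (a : Int) (b : Int) (out : Int) : Decidable (Spec_get_best_with_1 a b out) := by unfold Spec_get_best_with_1; infer_instance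

-- ===== CLAIM (what is proved, stated in full; the proofs are below) =====
def Claim_equal_get_best_with_1 : Prop := ∀ (a : Int) (b : Int), Dom_get_best_with_1 a b → Spec_get_best_with_1 a b (get_best_with_1 a b)

-- ===== LEMMAS AND PROOFS =====

-- Python's bit i of an integer (infinite two's complement for negatives).
def pvBit (y : Int) (i : ℕ) : Bool :=
  if 0 ≤ y then y.toNat.testBit i else !((-y - 1).toNat.testBit i)

theorem pvBit_band_pow (y : Int) (i : ℕ) :
    PySem.Int.band y ((2 : ℤ) ^ i) = (pvBit y i).toNat * 2 ^ i := by
  have h2 : (0 : ℤ) ≤ (2 : ℤ) ^ i := by positivity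
  have ht : ((2 : ℤ) ^ i).toNat = 2 ^ i := by
    rw [show ((2:ℤ)^i) = ((2^i : ℕ) : ℤ) by push_cast; ring, Int.toNat_natCast]
  by_cases hy : 0 ≤ y
  · simp only [PySem.Int.band, if_pos hy, if_pos h2, ht, pvBit, Nat.and_two_pow]
    push_cast
    ring
  · simp only [PySem.Int.band, if_neg hy, if_pos h2, ht, pvBit, Nat.two_pow_and]
    cases hb : (-y - 1).toNat.testBit i <;> simp

theorem pvBit_cond_iff (a b : Int) (i : ℕ) :
    (PySem.Int.band a ((2 : ℤ) ^ i) = PySem.Int.band b ((2 : ℤ) ^ i)) ↔ (pvBit a i = pvBit b i) := by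
  rw [pvBit_band_pow, pvBit_band_pow]
  have h2 : (0 : ℤ) < (2 : ℤ) ^ i := by positivity
  cases pvBit a i <;> cases pvBit b i <;> simp <;> omega

theorem pvBit_bxor (a b : Int) (i : ℕ) :
    pvBit (PySem.Int.bxor a b) i = xor (pvBit a i) (pvBit b i) := by
  by_cases ha : 0 ≤ a <;> by_cases hb : 0 ≤ b
  · have hx : (0:ℤ) ≤ ((a.toNat ^^^ b.toNat : ℕ) : ℤ) := by positivity
    simp only [PySem.Int.bxor, if_pos ha, if_pos hb, pvBit, if_pos hx,
      Int.toNat_natCast, Nat.testBit_xor]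
  · have hneg : ¬ (0:ℤ) ≤ -((a.toNat ^^^ (-b - 1).toNat : ℕ) : ℤ) - 1 := by
      have : (0:ℤ) ≤ ((a.toNat ^^^ (-b - 1).toNat : ℕ) : ℤ) := by positivity
      omega
    have harg : (-(-((a.toNat ^^^ (-b - 1).toNat : ℕ) : ℤ) - 1) - 1)
        = ((a.toNat ^^^ (-b - 1).toNat : ℕ) : ℤ) := by ring
    simp only [PySem.Int.bxor, if_pos ha, if_neg hb, pvBit, if_neg hneg, harg,
      Int.toNat_natCast, Nat.testBit_xor]
    cases a.toNat.testBit i <;> cases (-b - 1).toNat.testBit i <;> rfl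
  · have hneg : ¬ (0:ℤ) ≤ -(((-a - 1).toNat ^^^ b.toNat : ℕ) : ℤ) - 1 := by
      have : (0:ℤ) ≤ (((-a - 1).toNat ^^^ b.toNat : ℕ) : ℤ) := by positivity
      omega
    have harg : (-(-(((-a - 1).toNat ^^^ b.toNat : ℕ) : ℤ) - 1) - 1)
        = (((-a - 1).toNat ^^^ b.toNat : ℕ) : ℤ) := by ring
    simp only [PySem.Int.bxor, if_neg ha, if_pos hb, pvBit, if_neg hneg, harg,
      Int.toNat_natCast, Nat.testBit_xor]
    cases (-a - 1).toNat.testBit i <;> cases b.toNat.testBit i <;> rfl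
  · have hx : (0:ℤ) ≤ (((-a - 1).toNat ^^^ (-b - 1).toNat : ℕ) : ℤ) := by positivity
    simp only [PySem.Int.bxor, if_neg ha, if_neg hb, pvBit, if_pos hx,
      Int.toNat_natCast, Nat.testBit_xor]
    cases (-a - 1).toNat.testBit i <;> cases (-b - 1).toNat.testBit i <;> rfl

theorem pvBit_not (y : Int) (i : ℕ) : pvBit (Int.not y) i = !(pvBit y i) := by
  cases y with
  | ofNat n =>
    have h1 : ¬ (0:ℤ) ≤ Int.negSucc n := by rw [Int.negSucc_eq]; omega
    have h2 : (0:ℤ) ≤ Int.ofNat n := by rw [Int.ofNat_eq_natCast]; positivity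
    have h3 : (-(Int.negSucc n) - 1) = (Int.ofNat n) := by
      rw [Int.negSucc_eq, Int.ofNat_eq_natCast]; ring
    simp only [Int.not, pvBit, if_neg h1, if_pos h2, h3]
  | negSucc n =>
    have h1 : ¬ (0:ℤ) ≤ Int.negSucc n := by rw [Int.negSucc_eq]; omega
    have h2 : (0:ℤ) ≤ Int.ofNat n := by rw [Int.ofNat_eq_natCast]; positivity
    have h3 : (-(Int.negSucc n) - 1) = (Int.ofNat n) := by
      rw [Int.negSucc_eq, Int.ofNat_eq_natCast]; ring
    simp only [Int.not, pvBit, if_neg h1, if_pos h2, h3, Bool.not_not]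

theorem natsum_bits (m n : ℕ) :
    (m % 2 ^ n : ℕ) = ∑ i ∈ Finset.range n, (m.testBit i).toNat * 2 ^ i := by
  induction n with
  | zero => simp [Nat.mod_one]
  | succ n ih =>
    rw [Nat.mod_pow_succ, Finset.sum_range_succ, ← ih, Nat.toNat_testBit]
    ring

theorem geo_sum_int (n : ℕ) : ∑ i ∈ Finset.range n, (2 : ℤ) ^ i = 2 ^ n - 1 := by
  induction n with
  | zero => simp
  | succ n ih => rw [Finset.sum_range_succ, ih]; ring

theorem band_mask_sum (n : ℕ) (y : Int) :
    PySem.Int.band ((2 : ℤ) ^ n - 1) y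
      = ∑ i ∈ Finset.range n, (if pvBit y i then (2 : ℤ) ^ i else 0) := by
  have h1 : (1:ℕ) ≤ 2 ^ n := Nat.one_le_two_pow
  have hm : (0 : ℤ) ≤ (2 : ℤ) ^ n - 1 := by
    have := pow_pos (show (0:ℤ) < 2 by norm_num) n; omega
  have htm : ((2 : ℤ) ^ n - 1).toNat = 2 ^ n - 1 := by
    rw [show ((2:ℤ)^n - 1) = ((2^n - 1 : ℕ) : ℤ) by push_cast [h1]; ring, Int.toNat_natCast]
  by_cases hy : 0 ≤ y
  · simp only [PySem.Int.band, if_pos hm, if_pos hy, htm, Nat.land_comm,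
      Nat.and_two_pow_sub_one_eq_mod, natsum_bits]
    push_cast
    refine Finset.sum_congr rfl fun i _ => ?_
    simp only [pvBit, if_pos hy]
    cases y.toNat.testBit i <;> simp
  · simp only [PySem.Int.band, if_pos hm, if_neg hy, htm, Nat.land_comm,
      Nat.and_two_pow_sub_one_eq_mod]
    set m := (-y - 1).toNat with hmdef
    have hlt : m % 2 ^ n < 2 ^ n := Nat.mod_lt m (by positivity)
    have hb2 : ((2 ^ n : ℕ) : ℤ) = (2:ℤ) ^ n := by push_cast; ring
    have hcast : ((2 ^ n - 1 - m % 2 ^ n : ℕ) : ℤ)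
        = ((2:ℤ) ^ n - 1) - ((m % 2^n : ℕ) : ℤ) := by
      rw [← hb2]
      have h1' := h1
      have hlt' := hlt
      omega
    rw [hcast, natsum_bits,
      show ((2:ℤ)^n - 1) = ∑ i ∈ Finset.range n, (2:ℤ)^i from (geo_sum_int n).symm]
    push_cast
    rw [← Finset.sum_sub_distrib]
    refine Finset.sum_congr rfl fun i _ => ?_
    simp only [pvBit, if_neg hy, ← hmdef]
    cases m.testBit i <;> simp

theorem pyShl1_nat (k : ℕ) : pyShl1 ((0 : ℤ) + (k : ℤ)) = (2 : ℤ) ^ k := by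
  have h : ((0 : ℤ) + (k : ℤ)).toNat = k := by omega
  rw [pyShl1, h, Nat.shiftLeft_eq, one_mul]
  push_cast
  ring


theorem loopA (a b : Int) (n : ℕ) :
    (List.range n).foldl (fun ret (k : ℕ) =>
      if PySem.Int.band a (pyShl1 (0 + (k : ℤ))) = PySem.Int.band b (pyShl1 (0 + (k : ℤ))) then
        ret + 2 * pyShl1 (0 + (k : ℤ))
      else
        ret + 1 * pyShl1 (0 + (k : ℤ))) 0
    = ((2 : ℤ) ^ n - 1) + ∑ i ∈ Finset.range n, (if pvBit a i = pvBit b i then (2 : ℤ) ^ i else 0) := by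
  induction n with
  | zero => simp
  | succ n ih =>
    rw [List.range_succ, List.foldl_append, ih]
    simp only [List.foldl_cons, List.foldl_nil, pyShl1_nat, pvBit_cond_iff, Finset.sum_range_succ]
    by_cases h : pvBit a n = pvBit b n
    · rw [if_pos h, if_pos h]; ring
    · rw [if_neg h, if_neg h]; ring

-- ===== VERDICT (by name: the statement is the Claim_ definition above) =====
theorem get_best_with_1_spec : Claim_equal_get_best_with_1 := by
  intro a b _
  unfold Spec_get_best_with_1 get_best_with_1 get_best_with_1_alt
  rw [PySem.List.pyRange_one, show ((30:ℤ) - 0).toNat = 30 from by decide, List.foldl_map]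
  rw [loopA]
  show _ = ((1:ℤ) <<< 30 - 1) + PySem.Int.band ((1:ℤ) <<< 30 - 1) (Int.not (PySem.Int.bxor a b))
  rw [show ((1:ℤ) <<< 30 - 1) = (2:ℤ)^30 - 1 from by decide]
  rw [band_mask_sum]
  congr 1
  refine Finset.sum_congr rfl fun i _ => ?_
  rw [pvBit_not, pvBit_bxor]
  cases pvBit a i <;> cases pvBit b i <;> simp
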